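-- pv_equiv track=rewrite | github.com/ZiglaCity/A2SV | sample problems/hackSuccexCodersCup/isRowsAndColsUnique.py | isRowsAndColsUnique
-- ===== SOURCE A (Python) =====
-- def isRowsAndColsUnique(matrix):
--     n = len(matrix)
--     for i in range(len(matrix)):
--         rows = set()
--         cols = set()
--         for j in range(len(matrix)):
--             rows.add(matrix[i][j])
--             cols.add(matrix[j][i])
--         if len(rows) != n or len(cols) != n:
--             return False
--     return True
-- ===== SOURCE B (Python) =====
-- def isRowsAndColsUnique(matrix):
--     n = len(matrix)
--     cells = []
--     for i in range(n):
--         for j in range(n):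
--             v = matrix[i][j]
--             cells.append(("r", i, v))
--             cells.append(("c", j, v))
--     cnt = {}
--     for k in cells:
--         cnt[k] = cnt.get(k, 0) + 1
--     return all(c == 1 for c in cnt.values())
-- ===== Notes on version B (the rewrite author's own statement) =====
-- stated objective: alternative
-- what changed: Replaces A's per-index pair of hash sets with early exit by a global multiset algorithm: B labels every cell with its row tag ('r', i, v) and column tag ('c', j, v), counts all labels in one dictionary, and returns whether every multiplicity is 1.
-- outside the precondition, e.g. on isRowsAndColsUnique([[1, 2], [1]]): A returns False, B raises IndexError
import Mathlib
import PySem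

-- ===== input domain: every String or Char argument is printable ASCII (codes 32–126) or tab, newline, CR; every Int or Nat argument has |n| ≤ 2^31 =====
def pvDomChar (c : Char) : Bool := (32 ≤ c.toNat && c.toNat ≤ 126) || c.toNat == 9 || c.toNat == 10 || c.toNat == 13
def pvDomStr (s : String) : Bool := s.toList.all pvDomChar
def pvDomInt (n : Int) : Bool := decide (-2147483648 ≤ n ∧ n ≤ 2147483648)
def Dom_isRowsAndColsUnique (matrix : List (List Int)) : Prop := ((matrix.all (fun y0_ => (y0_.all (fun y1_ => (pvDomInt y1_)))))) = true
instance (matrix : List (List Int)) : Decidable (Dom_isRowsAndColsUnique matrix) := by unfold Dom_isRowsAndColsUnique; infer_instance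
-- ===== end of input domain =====

-- B replaces A's per-index pair of sets with early return by a global multiset check:
-- every cell is tagged with its row key ("r", i, v) and column key ("c", j, v), all keys
-- are counted in one dictionary, and the answer is whether every multiplicity is 1.
-- Pre_ excludes ragged matrices (a row shorter than len(matrix)): there A raises
-- IndexError, or returns False early only by the accident of scan order, and B raises
-- at a different point of its scan.


-- matrix[i][j]; total form, exact under Pre_ (in-range indices)
def pvGet (matrix : List (List Int)) (i j : Int) : Int :=
  PySem.List.pyGetD (PySem.List.pyGetD matrix i []) j 0

-- ===== PORT A =====
-- outer 'for i in range(len(matrix))' with early 'return False'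
def pvALoop (matrix : List (List Int)) : List Int → Bool
  | [] => true
  | i :: rest =>
    let n := matrix.length
    let rc := (PySem.List.pyRange 0 (n : Int) 1).foldl
        (fun (rc : PySem.Set Int × PySem.Set Int) j =>
          (PySem.Set.add rc.1 (pvGet matrix i j), PySem.Set.add rc.2 (pvGet matrix j i)))
        (PySem.Set.empty, PySem.Set.empty)
    if rc.1.length ≠ n ∨ rc.2.length ≠ n then false else pvALoop matrix rest

def isRowsAndColsUnique (matrix : List (List Int)) : Bool :=
  pvALoop matrix (PySem.List.pyRange 0 (matrix.length : Int) 1)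

-- ===== PORT B =====
-- the two labelled keys appended for cell (i, j)
def pvKeys (matrix : List (List Int)) (i j : Int) : List (String × Int × Int) :=
  [("r", i, pvGet matrix i j), ("c", j, pvGet matrix i j)]

-- 'for i in range(n): for j in range(n): cells.append(("r",i,v)); cells.append(("c",j,v))'
def pvCells (matrix : List (List Int)) : List (String × Int × Int) :=
  (PySem.List.pyRange 0 (matrix.length : Int) 1).foldl
    (fun acc i =>
      (PySem.List.pyRange 0 (matrix.length : Int) 1).foldl
        (fun acc j => acc ++ pvKeys matrix i j) acc)
    []

-- 'cnt[k] = cnt.get(k, 0) + 1' over cells, then 'all(c == 1 for c in cnt.values())'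
def isRowsAndColsUnique_alt (matrix : List (List Int)) : Bool :=
  let cells := pvCells matrix
  let cnt := cells.foldl
      (fun (d : PySem.Dict (String × Int × Int) Int) k => d.insert k (d.getD k 0 + 1))
      PySem.Dict.empty
  cnt.values.all (fun c => c == (1 : Int))

-- ===== PRECONDITION & SPEC =====
-- Pre_ excludes ragged matrices (a row shorter than len(matrix)); on those A raises
-- IndexError, or returns False early only by the accident of its scan order, while B's
-- cell scan raises at a different point.
def Pre_isRowsAndColsUnique (matrix : List (List Int)) : Prop :=
  ∀ row ∈ matrix, matrix.length ≤ row.length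
instance (matrix : List (List Int)) : Decidable (Pre_isRowsAndColsUnique matrix) := by
  unfold Pre_isRowsAndColsUnique; infer_instance

def pvWitness_isRowsAndColsUnique : List (List Int) := [[1, 2], [2, 1]]

def Spec_isRowsAndColsUnique (matrix : List (List Int)) (out : Bool) : Prop := out = isRowsAndColsUnique_alt matrix
instance (matrix : List (List Int)) (out : Bool) : Decidable (Spec_isRowsAndColsUnique matrix out) := by unfold Spec_isRowsAndColsUnique; infer_instance

-- ===== CLAIM (what is proved, stated in full; the proofs are below) =====
def Claim_equal_isRowsAndColsUnique : Prop := ∀ (matrix : List (List Int)), Dom_isRowsAndColsUnique matrix → Pre_isRowsAndColsUnique matrix → Spec_isRowsAndColsUnique matrix (isRowsAndColsUnique matrix)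

-- ===== LEMMAS AND PROOFS =====

-- row i and column j of the n×n prefix, as value lists
def pvRow (matrix : List (List Int)) (i : Int) : List Int :=
  (PySem.List.pyRange 0 (matrix.length : Int) 1).map (fun j => pvGet matrix i j)
def pvCol (matrix : List (List Int)) (j : Int) : List Int :=
  (PySem.List.pyRange 0 (matrix.length : Int) 1).map (fun i => pvGet matrix i j)

-- B's cell list as a nested flatMap
theorem pvCells_eq (m : List (List Int)) :
    pvCells m = (PySem.List.pyRange 0 (m.length : Int) 1).flatMap
      (fun i => (PySem.List.pyRange 0 (m.length : Int) 1).flatMap (fun j => pvKeys m i j)) := by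
  unfold pvCells
  have h1 : ∀ (i : Int) (acc : List (String × Int × Int)),
      (PySem.List.pyRange 0 (m.length : Int) 1).foldl (fun acc j => acc ++ pvKeys m i j) acc
        = acc ++ (PySem.List.pyRange 0 (m.length : Int) 1).flatMap (pvKeys m i) := by
    intro i acc; exact PySem.List.foldl_append_eq_flatMap _ _ _
  calc (PySem.List.pyRange 0 (m.length : Int) 1).foldl
        (fun acc i => (PySem.List.pyRange 0 (m.length : Int) 1).foldl (fun acc j => acc ++ pvKeys m i j) acc) []
      = (PySem.List.pyRange 0 (m.length : Int) 1).foldl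
        (fun acc i => acc ++ (PySem.List.pyRange 0 (m.length : Int) 1).flatMap (pvKeys m i)) [] := by
        apply PySem.List.foldl_congr_mem; intro acc i _; exact h1 i acc
    _ = _ := by
        rw [PySem.List.foldl_append_eq_flatMap (acc := []) (g := fun i => (PySem.List.pyRange 0 (m.length : Int) 1).flatMap (pvKeys m i))]
        simp [List.flatMap]

theorem pv_count_flatMap {α β : Type} [BEq β] (a : β) (f : α → List β) :
    ∀ l : List α, List.count a (l.flatMap f) = (l.map (fun x => List.count a (f x))).sum := by
  intro l; induction l with
  | nil => simp
  | cons x xs ih => simp [List.count_append, ih]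

theorem pv_sum_ite_single {α : Type} [DecidableEq α] (i0 : α) (c : Nat) :
    ∀ l : List α, l.Nodup →
      (l.map (fun i => if i = i0 then c else 0)).sum = if i0 ∈ l then c else 0 := by
  intro l; induction l with
  | nil => simp
  | cons x xs ih =>
    intro h
    rcases List.nodup_cons.mp h with ⟨hx, hxs⟩
    by_cases hxi : x = i0
    · subst hxi; simp [hx, ih hxs]
    · simp [hxi, ih hxs, Ne.symm hxi]

-- multiplicity of the "r"-tagged key in B's cell list = multiplicity of v in row i0
theorem pv_count_r (m : List (List Int)) (i0 v : Int) :
    (pvCells m).count ("r", i0, v)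
      = if i0 ∈ PySem.List.pyRange 0 (m.length : Int) 1 then (pvRow m i0).count v else 0 := by
  rw [pvCells_eq, pv_count_flatMap]
  have hinner : ∀ i : Int,
      List.count ("r", i0, v)
        ((PySem.List.pyRange 0 (m.length : Int) 1).flatMap (fun j => pvKeys m i j))
      = if i = i0 then (pvRow m i0).count v else 0 := by
    intro i
    rw [pv_count_flatMap]
    by_cases hi : i = i0
    · subst hi
      rw [if_pos rfl]
      have hk : ∀ j : Int, List.count ("r", i, v) (pvKeys m i j)
          = if pvGet m i j == v then 1 else 0 := by
        intro j
        by_cases hv : pvGet m i j = v <;> simp [pvKeys, hv]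
      rw [List.map_congr_left (fun j _ => hk j), PySem.List.sum_map_ite_one_zero_nat]
      simp [pvRow, List.count, List.countP_map, Function.comp_def]
    · rw [if_neg hi]
      have hk : ∀ j : Int, List.count ("r", i0, v) (pvKeys m i j) = 0 := by
        intro j; simp [pvKeys, hi]
      rw [List.map_congr_left (fun j _ => hk j)]
      simp
  rw [List.map_congr_left (fun i _ => hinner i)]
  exact pv_sum_ite_single _ _ _ (PySem.List.nodup_pyRange_one 0 (m.length : Int))

-- multiplicity of the "c"-tagged key in B's cell list = multiplicity of v in column j0
theorem pv_count_c (m : List (List Int)) (j0 v : Int) :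
    (pvCells m).count ("c", j0, v)
      = if j0 ∈ PySem.List.pyRange 0 (m.length : Int) 1 then (pvCol m j0).count v else 0 := by
  rw [pvCells_eq, pv_count_flatMap]
  have hinner : ∀ i : Int,
      List.count ("c", j0, v)
        ((PySem.List.pyRange 0 (m.length : Int) 1).flatMap (fun j => pvKeys m i j))
      = if j0 ∈ PySem.List.pyRange 0 (m.length : Int) 1 then
          (if pvGet m i j0 == v then 1 else 0) else 0 := by
    intro i
    rw [pv_count_flatMap]
    have hk : ∀ j : Int, List.count ("c", j0, v) (pvKeys m i j)
        = if j = j0 then (if pvGet m i j0 == v then 1 else 0) else 0 := by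
      intro j
      by_cases hj : j = j0
      · subst hj
        by_cases hv : pvGet m i j = v <;> simp [pvKeys, hv]
      · simp [pvKeys, hj]
    rw [List.map_congr_left (fun j _ => hk j)]
    exact pv_sum_ite_single _ _ _ (PySem.List.nodup_pyRange_one 0 (m.length : Int))
  rw [List.map_congr_left (fun i _ => hinner i)]
  by_cases hmem : j0 ∈ PySem.List.pyRange 0 (m.length : Int) 1
  · simp only [hmem, if_true]
    rw [PySem.List.sum_map_ite_one_zero_nat]
    simp [pvCol, List.count, List.countP_map, Function.comp_def]
  · simp [hmem]

-- B returns true iff every key of its cell list has multiplicity 1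
theorem pv_B_iff (m : List (List Int)) :
    isRowsAndColsUnique_alt m = true ↔ ∀ k ∈ pvCells m, (pvCells m).count k = 1 := by
  show ((pvCells m).foldl
      (fun (d : PySem.Dict (String × Int × Int) Int) k => d.insert k (d.getD k 0 + 1))
      PySem.Dict.empty).values.all (fun c => c == (1 : Int)) = true ↔ _
  rw [PySem.Dict.foldl_insert_getD_add_one_eq_counter,
      PySem.Dict.values_eq_map_keys _ (PySem.Dict.nodup_keys_counter _) 0,
      PySem.Dict.keys_counter]
  simp only [List.all_map, List.all_eq_true, PySem.Dict.getD_counter, PySem.Set.mem_ofList,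
    Function.comp_def, beq_iff_eq]
  constructor
  · intro h k hk; have := h k hk; omega
  · intro h k hk; have := h k hk; omega

-- B returns true iff every (prefix) row and column is duplicate-free
theorem pv_B_char (m : List (List Int)) :
    isRowsAndColsUnique_alt m = true ↔
      ∀ i ∈ PySem.List.pyRange 0 (m.length : Int) 1, (pvRow m i).Nodup ∧ (pvCol m i).Nodup := by
  rw [pv_B_iff]
  constructor
  · intro h i hi
    constructor
    · apply List.nodup_iff_count_eq_one.mpr
      intro v hv
      have hpos : 0 < (pvCells m).count ("r", i, v) := by
        rw [pv_count_r, if_pos hi]; exact List.count_pos_iff.mpr hv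
      have h1 := h _ (List.count_pos_iff.mp hpos)
      rw [pv_count_r, if_pos hi] at h1; exact h1
    · apply List.nodup_iff_count_eq_one.mpr
      intro v hv
      have hpos : 0 < (pvCells m).count ("c", i, v) := by
        rw [pv_count_c, if_pos hi]; exact List.count_pos_iff.mpr hv
      have h1 := h _ (List.count_pos_iff.mp hpos)
      rw [pv_count_c, if_pos hi] at h1; exact h1
  · intro h k hk
    rw [pvCells_eq] at hk
    obtain ⟨i, hi, hk⟩ := List.mem_flatMap.mp hk
    obtain ⟨j, hj, hk⟩ := List.mem_flatMap.mp hk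
    have hrow : pvGet m i j ∈ pvRow m i := List.mem_map.mpr ⟨j, hj, rfl⟩
    have hcol : pvGet m i j ∈ pvCol m j := List.mem_map.mpr ⟨i, hi, rfl⟩
    rcases (by simpa [pvKeys] using hk :
        k = ("r", i, pvGet m i j) ∨ k = ("c", j, pvGet m i j)) with h1 | h1 <;> subst h1
    · rw [pv_count_r, if_pos hi]
      exact List.count_eq_one_of_mem (h i hi).1 hrow
    · rw [pv_count_c, if_pos hj]
      exact List.count_eq_one_of_mem (h j hj).2 hcol

-- A-side: building a set by repeated add is set(...) of the mapped list
theorem pv_fold_ofList (f : Int → Int) (l : List Int) :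
    l.foldl (fun s j => PySem.Set.add s (f j)) ([] : PySem.Set Int)
      = PySem.Set.ofList (l.map f) := by
  rw [← PySem.Set.update_map_eq_foldl_add]
  exact PySem.Set.update_nil_left _

theorem pv_foldl_add_sublist {α : Type} [BEq α] [LawfulBEq α] :
    ∀ (l : List α) (s : PySem.Set α), List.Sublist (l.foldl PySem.Set.add s) (s ++ l) := by
  intro l
  induction l with
  | nil => intro s; simp
  | cons x xs ih =>
    intro s
    show List.Sublist (xs.foldl PySem.Set.add (PySem.Set.add s x)) (s ++ x :: xs)
    rw [PySem.Set.add_eq_ite]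
    by_cases hx : x ∈ s
    · rw [if_pos hx]
      exact (ih s).trans (List.Sublist.append_left (List.sublist_cons_self x xs) s)
    · rw [if_neg hx]
      simpa [List.append_assoc] using ih (s ++ [x])

-- len(set(l)) == len(l) iff l has no duplicates
theorem pv_ofList_length_iff {α : Type} [BEq α] [LawfulBEq α] (l : List α) :
    (PySem.Set.ofList l).length = l.length ↔ l.Nodup := by
  constructor
  · intro h
    have hsub : List.Sublist (PySem.Set.ofList l) l := by
      simpa using pv_foldl_add_sublist l ([] : PySem.Set α)
    have : PySem.Set.ofList l = l := hsub.eq_of_length h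
    rw [← this]; exact PySem.Set.nodup_ofList l
  · intro h; rw [PySem.Set.ofList_eq_self_of_nodup l h]

theorem pv_len_row (m : List (List Int)) (i : Int) : (pvRow m i).length = m.length := by
  simp [pvRow, PySem.List.length_pyRange_one]

theorem pv_len_col (m : List (List Int)) (i : Int) : (pvCol m i).length = m.length := by
  simp [pvCol, PySem.List.length_pyRange_one]

-- A's early-exit loop is the conjunction of the per-index row/column nodup tests
theorem pvALoop_eq_all (m : List (List Int)) :
    ∀ l : List Int, pvALoop m l
      = l.all (fun i => decide ((pvRow m i).Nodup) && decide ((pvCol m i).Nodup)) := by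
  intro l
  induction l with
  | nil => rfl
  | cons i rest ih =>
    show (if _ then false else pvALoop m rest) = _
    rw [PySem.List.foldl_prod_mk (f := fun s j => PySem.Set.add s (pvGet m i j))
        (g := fun s j => PySem.Set.add s (pvGet m j i))]
    show (if (((PySem.List.pyRange 0 (m.length : Int) 1).foldl (fun s j => PySem.Set.add s (pvGet m i j)) PySem.Set.empty).length ≠ m.length ∨
              ((PySem.List.pyRange 0 (m.length : Int) 1).foldl (fun s j => PySem.Set.add s (pvGet m j i)) PySem.Set.empty).length ≠ m.length)
          then false else pvALoop m rest) = _
    have hr : ((PySem.List.pyRange 0 (m.length : Int) 1).foldl (fun s j => PySem.Set.add s (pvGet m i j)) PySem.Set.empty)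
        = PySem.Set.ofList (pvRow m i) := pv_fold_ofList _ _
    have hc : ((PySem.List.pyRange 0 (m.length : Int) 1).foldl (fun s j => PySem.Set.add s (pvGet m j i)) PySem.Set.empty)
        = PySem.Set.ofList (pvCol m i) := pv_fold_ofList _ _
    rw [hr, hc, ih]
    have hrow : ((PySem.Set.ofList (pvRow m i)).length = m.length) ↔ (pvRow m i).Nodup := by
      rw [← pv_len_row m i, pv_ofList_length_iff]
    have hcol : ((PySem.Set.ofList (pvCol m i)).length = m.length) ↔ (pvCol m i).Nodup := by
      rw [← pv_len_col m i, pv_ofList_length_iff]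
    by_cases h1 : (pvRow m i).Nodup <;> by_cases h2 : (pvCol m i).Nodup <;>
      simp [List.all_cons, h1, h2, hrow.mpr, hcol.mpr, fun h => (hrow.not.mpr h), fun h => (hcol.not.mpr h)]

-- A returns true iff every (prefix) row and column is duplicate-free
theorem pv_A_char (m : List (List Int)) :
    isRowsAndColsUnique m = true ↔
      ∀ i ∈ PySem.List.pyRange 0 (m.length : Int) 1, (pvRow m i).Nodup ∧ (pvCol m i).Nodup := by
  unfold isRowsAndColsUnique
  rw [pvALoop_eq_all]
  simp [List.all_eq_true]

-- ===== VERDICT (by name: the statement is the Claim_ definition above) =====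
theorem isRowsAndColsUnique_spec : Claim_equal_isRowsAndColsUnique := by
  intro matrix _ _
  unfold Spec_isRowsAndColsUnique
  exact Bool.eq_iff_iff.mpr (by rw [pv_A_char, pv_B_char])
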